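-- pv_equiv track=rewrite | github.com/DannyRuchtie/mooddream | worker/moondream_worker.py | _tokenize_candidates
-- ===== SOURCE A (Python) =====
-- from typing import Any, Dict, List, Optional, Tuple
--
-- def _tokenize_candidates(text: str) -> List[str]:
--     # Very lightweight candidate extraction (MVP). We keep it deterministic and cheap.
--     # Note: detect will be the filter/ground-truth.
--     stop = {
--         "the",
--         "and",
--         "with",
--         "without",
--         "from",
--         "into",
--         "over",
--         "under",
--         "near",
--         "behind",
--         "front",
--         "left",
--         "right",
--         "top",
--         "bottom",
--         "this",
--         "that",
--         "these",
--         "those",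
--         "there",
--         "here",
--         "image",
--         "photo",
--         "picture",
--         "view",
--         "scene",
--         "very",
--         "more",
--         "most",
--         "some",
--         "many",
--         "few",
--         "one",
--         "two",
--         "three",
--     }
--     raw = (
--         text.lower()
--         .replace("\n", " ")
--         .replace("\t", " ")
--         .replace("/", " ")
--         .replace("\\", " ")
--     )
--     tokens = []
--     buf = []
--     for ch in raw:
--         if "a" <= ch <= "z" or ch == " ":
--             buf.append(ch)
--         else:
--             buf.append(" ")
--     for t in "".join(buf).split():
--         if len(t) < 3:
--             continue
--         if t in stop:
--             continue
--         tokens.append(t)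
--     # Preserve rough relevance by first occurrence order, but de-dupe.
--     seen = set()
--     out = []
--     for t in tokens:
--         if t in seen:
--             continue
--         seen.add(t)
--         out.append(t)
--     return out
-- ===== SOURCE B (Python) =====
-- from typing import List
--
-- _STOP = frozenset({
--     "the", "and", "with", "without", "from", "into", "over", "under", "near",
--     "behind", "front", "left", "right", "top", "bottom", "this", "that",
--     "these", "those", "there", "here", "image", "photo", "picture", "view",
--     "scene", "very", "more", "most", "some", "many", "few", "one", "two",
--     "three",
-- })
--
--
-- def _tokenize_candidates(text: str) -> List[str]:
--     # Single streaming pass: lowercase once, walk the characters keeping the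
--     # current word; any non-letter is a boundary, and at each boundary the
--     # length/stopword/dedupe checks run at once.
--     out: List[str] = []
--     seen = set()
--     cur: List[str] = []
--
--     def flush() -> None:
--         if cur:
--             t = "".join(cur)
--             if len(t) >= 3 and t not in _STOP and t not in seen:
--                 seen.add(t)
--                 out.append(t)
--             cur.clear()
--
--     for ch in text.lower():
--         if "a" <= ch <= "z":
--             cur.append(ch)
--         else:
--             flush()
--     flush()
--     return out
-- ===== Notes on version B (the rewrite author's own statement) =====
-- stated objective: alternative
-- what changed: Replaces A's five-pass pipeline (lower + four replace passes + char-cleaning pass + join/split + filter pass + dedupe pass, with intermediate lists) by one streaming pass over the lowered text that grows a current-word buffer on letters and, at each non-letter boundary, applies the length/stopword/seen checks in a single step.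
import Mathlib
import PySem

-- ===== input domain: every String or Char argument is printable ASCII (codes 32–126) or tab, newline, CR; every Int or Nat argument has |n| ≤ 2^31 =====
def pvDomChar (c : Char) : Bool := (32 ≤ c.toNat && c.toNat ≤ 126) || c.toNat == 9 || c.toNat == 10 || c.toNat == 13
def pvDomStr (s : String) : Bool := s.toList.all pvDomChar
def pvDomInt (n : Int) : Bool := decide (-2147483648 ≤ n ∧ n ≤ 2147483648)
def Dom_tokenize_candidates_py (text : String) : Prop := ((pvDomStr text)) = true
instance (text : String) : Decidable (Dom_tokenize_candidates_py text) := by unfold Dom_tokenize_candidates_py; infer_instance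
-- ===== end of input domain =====

-- B fuses A's lower/replace/clean/split/filter/dedupe passes into one streaming pass over the
-- lowered text (alternative decomposition, same complexity); proved to return the same list.


-- the module-level stop-word set literal (shared by both Pythons)
def pvStop : PySem.Set String := PySem.Set.ofList
  ["the", "and", "with", "without", "from", "into", "over", "under", "near",
   "behind", "front", "left", "right", "top", "bottom", "this", "that",
   "these", "those", "there", "here", "image", "photo", "picture", "view",
   "scene", "very", "more", "most", "some", "many", "few", "one", "two",
   "three"]

-- ===== PORT A =====
def tokenize_candidates_py (text : String) : List String :=
  let raw := PySem.Str.replace (PySem.Str.replace (PySem.Str.replace (PySem.Str.replace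
      (PySem.Str.lower text) "\n" " ") "\t" " ") "/" " ") "\\" " "
  let buf := raw.toList.foldl
    (fun b ch => b ++ [if ('a' ≤ ch ∧ ch ≤ 'z') ∨ ch = ' ' then ch else ' ']) []
  let tokens := (PySem.Str.split₀ (String.ofList buf)).foldl
    (fun acc t =>
      if PySem.Str.len t < 3 then acc
      else if pvStop.contains t then acc
      else acc ++ [t]) []
  let res := tokens.foldl
    (fun (so : PySem.Set String × List String) t =>
      if so.1.contains t then so else (so.1.add t, so.2 ++ [t]))
    (PySem.Set.empty, [])
  res.2

-- ===== PORT B =====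
-- flush(): close the current word, apply the length/stop/seen checks in one step
def pvFlushB (cur : List Char) (seen : PySem.Set String) (out : List String) :
    PySem.Set String × List String :=
  if cur = [] then (seen, out)
  else
    let t := String.ofList cur
    if 3 ≤ PySem.Str.len t ∧ pvStop.contains t = false ∧ seen.contains t = false then
      (seen.add t, out ++ [t])
    else (seen, out)

-- the streaming loop of B: letters extend the current word, anything else is a boundary
def pvGoB : List Char → List Char → PySem.Set String → List String → List String
  | [], cur, seen, out => (pvFlushB cur seen out).2
  | c :: cs, cur, seen, out =>
      if 'a' ≤ c ∧ c ≤ 'z' then pvGoB cs (cur ++ [c]) seen out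
      else pvGoB cs [] (pvFlushB cur seen out).1 (pvFlushB cur seen out).2

def tokenize_candidates_py_alt (text : String) : List String :=
  pvGoB (PySem.Str.lower text).toList [] PySem.Set.empty []

-- ===== PRECONDITION & SPEC =====
def Spec_tokenize_candidates_py (text : String) (out : List String) : Prop := out = tokenize_candidates_py_alt text
instance (text : String) (out : List String) : Decidable (Spec_tokenize_candidates_py text out) := by unfold Spec_tokenize_candidates_py; infer_instance

-- ===== CLAIM (what is proved, stated in full; the proofs are below) =====
def Claim_equal_tokenize_candidates_py : Prop := ∀ (text : String), Dom_tokenize_candidates_py text → Spec_tokenize_candidates_py text (tokenize_candidates_py text)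

-- ===== LEMMAS AND PROOFS =====

-- A's char-cleaning step (letters and spaces kept, everything else becomes a space)
def pvClean (ch : Char) : Char := if ('a' ≤ ch ∧ ch ≤ 'z') ∨ ch = ' ' then ch else ' '

-- A's token filter as a Bool predicate
def pvGood (t : String) : Bool := !(decide (PySem.Str.len t < 3)) && !(pvStop.contains t)

-- A's dedupe step
def pvDstep (so : PySem.Set String × List String) (t : String) :
    PySem.Set String × List String :=
  if so.1.contains t then so else (so.1.add t, so.2 ++ [t])

theorem pv_replace_go_single (o n : Char) :
    ∀ (cs : List Char) (fuel : Nat) (acc : List Char), cs.length ≤ fuel →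
      PySem.Chars.replace.go [o] [n] fuel cs acc
        = acc.reverse ++ cs.map (fun c => if c = o then n else c) := by
  intro cs
  induction cs with
  | nil =>
    intro fuel acc _
    cases fuel <;> simp [PySem.Chars.replace.go]
  | cons c t ih =>
    intro fuel acc h
    cases fuel with
    | zero => simp at h
    | succ f =>
      simp only [PySem.Chars.replace.go]
      by_cases hc : c = o
      · have hp : List.isPrefixOf [o] (c :: t) = true := by
          simp [List.isPrefixOf, hc]
        rw [if_pos hp]
        simp only [List.length_cons, List.drop_succ_cons, List.length_nil, List.drop_zero,
          List.reverse_cons, List.reverse_nil, List.nil_append]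
        rw [List.singleton_append, ih f (n :: acc) (by simpa using Nat.le_of_succ_le_succ h)]
        simp [hc]
      · have hp : List.isPrefixOf [o] (c :: t) = false := by
          simp [List.isPrefixOf]
          exact fun he => absurd he.symm hc
        rw [if_neg (by simp [hp])]
        rw [ih f (c :: acc) (by simpa using Nat.le_of_succ_le_succ h)]
        simp [hc]

theorem pv_replace_single (cs : List Char) (o n : Char) :
    PySem.Chars.replace cs [o] [n] = cs.map (fun c => if c = o then n else c) := by
  rw [PySem.Chars.replace]
  simp only [List.isEmpty_cons, if_false, Bool.false_eq_true]
  exact pv_replace_go_single o n cs cs.length [] le_rfl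

theorem pv_foldl_append_map (f : Char → Char) :
    ∀ (l acc : List Char), List.foldl (fun b ch => b ++ [f ch]) acc l = acc ++ l.map f := by
  intro l
  induction l with
  | nil => simp
  | cons c t ih => intro acc; simp [List.foldl, ih]

theorem pv_clean_letter (c : Char) (h : 'a' ≤ c ∧ c ≤ 'z') : pvClean c = c := by
  simp [pvClean, h]

theorem pv_clean_not_letter (c : Char) (h : ¬ ('a' ≤ c ∧ c ≤ 'z')) : pvClean c = ' ' := by
  unfold pvClean
  by_cases hs : c = ' '
  · simp [hs]
  · simp [h, hs]

theorem pv_isspace_letter (c : Char) (h : 'a' ≤ c ∧ c ≤ 'z') :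
    PySem.Chars.isspace c = false := by
  obtain ⟨h1, h2⟩ := h
  simp [Char.le_def, UInt32.le_iff_toNat_le] at h1 h2
  have h1' : 97 ≤ c.toNat := h1
  have h2' : c.toNat ≤ 122 := h2
  unfold PySem.Chars.isspace
  simp only [Bool.or_eq_false_iff, Bool.and_eq_false_iff, decide_eq_false_iff_not]
  omega

theorem pv_isspace_space : PySem.Chars.isspace ' ' = true := by decide

theorem pv_clean_subs (c : Char) :
    pvClean (if (if (if (if c = '\n' then ' ' else c) = '\t' then ' '
      else (if c = '\n' then ' ' else c)) = '/' then ' '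
      else (if (if c = '\n' then ' ' else c) = '\t' then ' '
      else (if c = '\n' then ' ' else c))) = '\\' then ' '
      else (if (if (if c = '\n' then ' ' else c) = '\t' then ' '
      else (if c = '\n' then ' ' else c)) = '/' then ' '
      else (if (if c = '\n' then ' ' else c) = '\t' then ' '
      else (if c = '\n' then ' ' else c)))) = pvClean c := by
  by_cases h1 : c = '\n' <;> by_cases h2 : c = '\t' <;> by_cases h3 : c = '/' <;>
    by_cases h4 : c = '\\' <;> simp_all <;> subst_vars <;> decide

theorem pv_split_go_acc :
    ∀ (l cur : List Char) (acc : List (List Char)),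
      PySem.Chars.split₀.go l cur acc = acc.reverse ++ PySem.Chars.split₀.go l cur [] := by
  intro l
  induction l with
  | nil =>
    intro cur acc
    by_cases h : cur.isEmpty <;> simp [PySem.Chars.split₀.go, h]
  | cons c rest ih =>
    intro cur acc
    simp only [PySem.Chars.split₀.go]
    by_cases hs : PySem.Chars.isspace c = true
    · rw [if_pos hs, if_pos hs]
      by_cases he : cur.isEmpty = true
      · rw [if_pos he, if_pos he]; exact ih [] acc
      · rw [if_neg he, if_neg he]
        rw [ih [] (cur.reverse :: acc), ih [] [cur.reverse]]
        simp
    · rw [if_neg hs, if_neg hs]; exact ih (c :: cur) acc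

theorem pv_flush_state (cur : List Char) (seen : PySem.Set String) (out : List String) :
    List.foldl pvDstep (seen, out) (List.filter pvGood [String.ofList cur])
      = pvFlushB cur seen out := by
  by_cases hcur : cur = []
  · subst hcur
    simp [pvFlushB, pvGood, List.filter, PySem.Str.len, PySem.Chars.len]
  · have hstrlen : PySem.Str.len (String.ofList cur) = cur.length := by
      simp [PySem.Str.len, PySem.Chars.len]
    by_cases hlen : cur.length < 3 <;>
      by_cases hstop : String.ofList cur ∈ pvStop <;>
      by_cases hseen : String.ofList cur ∈ seen <;>
      simp [pvFlushB, pvGood, pvDstep, List.filter, hcur, hstrlen, hlen, hstop, hseen,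
        Nat.not_lt]

theorem pv_main :
    ∀ (cs cur : List Char) (seen : PySem.Set String) (out : List String),
      pvGoB cs cur seen out =
        (List.foldl pvDstep (seen, out)
          (((PySem.Chars.split₀.go (cs.map pvClean) cur.reverse []).map String.ofList).filter
            pvGood)).2 := by
  intro cs
  induction cs with
  | nil =>
    intro cur seen out
    simp only [List.map_nil, PySem.Chars.split₀.go]
    by_cases hcur : cur = []
    · subst hcur
      simp [pvGoB, pvFlushB]
    · have he : cur.reverse.isEmpty = false := by simp [hcur]
      rw [if_neg (by simp [he])]
      simp only [List.reverse_nil, List.nil_append, List.reverse_cons, List.reverse_reverse]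
      show pvGoB [] cur seen out = _
      simp only [pvGoB]
      rw [← pv_flush_state cur seen out]
      rfl
  | cons c cs ih =>
    intro cur seen out
    by_cases hl : 'a' ≤ c ∧ c ≤ 'z'
    · have hclean : pvClean c = c := pv_clean_letter c hl
      have hsp : PySem.Chars.isspace c = false := pv_isspace_letter c hl
      simp only [pvGoB, hl, if_true, List.map_cons, hclean, PySem.Chars.split₀.go, hsp,
        Bool.false_eq_true, if_false]
      rw [ih (cur ++ [c]) seen out]
      simp
    · have hclean : pvClean c = ' ' := pv_clean_not_letter c hl
      simp only [pvGoB, hl, if_false, List.map_cons, hclean, PySem.Chars.split₀.go,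
        pv_isspace_space, if_true]
      by_cases hcur : cur = []
      · subst hcur
        simp only [List.reverse_nil, List.isEmpty_nil, if_true]
        rw [show pvFlushB [] seen out = (seen, out) from by simp [pvFlushB]]
        have := ih [] seen out
        simp only [List.reverse_nil] at this
        exact this
      · have he : cur.reverse.isEmpty = false := by simp [hcur]
        rw [if_neg (by simp [he])]
        rw [pv_split_go_acc _ [] [cur.reverse.reverse]]
        simp only [List.reverse_cons, List.reverse_nil, List.nil_append, List.reverse_reverse,
          List.map_append, List.map_cons, List.map_nil, List.filter_append]
        rw [List.foldl_append, pv_flush_state cur seen out]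
        rw [ih [] (pvFlushB cur seen out).1 (pvFlushB cur seen out).2]
        rfl

theorem pv_foldl_filter :
    ∀ (l acc : List String),
      List.foldl (fun acc t =>
        if PySem.Str.len t < 3 then acc
        else if pvStop.contains t then acc
        else acc ++ [t]) acc l = acc ++ l.filter pvGood := by
  intro l
  induction l with
  | nil => simp
  | cons t l ih =>
    intro acc
    rw [List.foldl_cons]
    have hL : PySem.Str.len t = (t.length : Int) := by
      simp [PySem.Str.len, PySem.Chars.len]
    by_cases h1 : PySem.Str.len t < 3
    · rw [if_pos h1, ih]
      rw [hL] at h1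
      have hg : pvGood t = false := by
        simp [pvGood]; intro h; exact absurd h (by omega)
      simp [List.filter, hg]
    · rw [if_neg h1]
      by_cases h2 : pvStop.contains t = true
      · rw [if_pos h2, ih]
        have hg : pvGood t = false := by
          simp [pvGood]; intro _; simpa using h2
        simp [List.filter, hg]
      · rw [if_neg h2, ih]
        rw [hL] at h1
        have hg : pvGood t = true := by
          simp [pvGood]
          exact ⟨by omega, by simpa using h2⟩
        simp [List.filter, hg]

theorem pv_equal (text : String) :
    tokenize_candidates_py text = tokenize_candidates_py_alt text := by
  simp only [tokenize_candidates_py, tokenize_candidates_py_alt]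
  rw [show (fun (b : List Char) (ch : Char) =>
        b ++ [if ('a' ≤ ch ∧ ch ≤ 'z') ∨ ch = ' ' then ch else ' '])
      = (fun b ch => b ++ [pvClean ch]) from rfl]
  rw [pv_foldl_append_map]
  simp only [List.nil_append]
  rw [show (PySem.Str.replace (PySem.Str.replace (PySem.Str.replace (PySem.Str.replace
      (PySem.Str.lower text) "\n" " ") "\t" " ") "/" " ") "\\" " ").toList
    = PySem.Chars.replace (PySem.Chars.replace (PySem.Chars.replace (PySem.Chars.replace
      (PySem.Chars.lower text.toList) ['\n'] [' ']) ['\t'] [' ']) ['/'] [' ']) ['\\'] [' ']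
    from by simp [PySem.Str.toList_replace, PySem.Str.toList_lower]]
  rw [pv_replace_single, pv_replace_single, pv_replace_single, pv_replace_single]
  have hcl : List.map pvClean (List.map (fun c => if c = '\\' then ' ' else c)
        (List.map (fun c => if c = '/' then ' ' else c)
          (List.map (fun c => if c = '\t' then ' ' else c)
            (List.map (fun c => if c = '\n' then ' ' else c) (PySem.Chars.lower text.toList)))))
      = List.map pvClean (PySem.Chars.lower text.toList) := by
    simp only [List.map_map]
    apply List.map_congr_left
    intro a _
    exact pv_clean_subs a
  rw [hcl]
  rw [show PySem.Str.split₀ (String.ofList (List.map pvClean (PySem.Chars.lower text.toList)))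
      = (PySem.Chars.split₀ ((PySem.Chars.lower text.toList).map pvClean)).map String.ofList
      from by
    have h := PySem.Str.split₀_map_toList
      (String.ofList ((PySem.Chars.lower text.toList).map pvClean))
    rw [String.toList_ofList] at h
    rw [← h, List.map_map]
    simp [Function.comp_def, String.ofList_toList]]
  rw [pv_foldl_filter]
  rw [show (fun (so : PySem.Set String × List String) t =>
        if so.1.contains t then so else (so.1.add t, so.2 ++ [t])) = pvDstep from rfl]
  rw [PySem.Str.toList_lower]
  rw [pv_main]
  simp only [List.reverse_nil]
  rfl

-- ===== VERDICT (by name: the statement is the Claim_ definition above) =====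
theorem tokenize_candidates_py_spec : Claim_equal_tokenize_candidates_py := by
  intro text _
  unfold Spec_tokenize_candidates_py
  exact pv_equal text
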